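-- pv_equiv track=rewrite | github.com/daniel-reich/ubiquitous-fiesta | PbucHZpWm6ZGEtqki_21.py | sliding_sum
-- ===== SOURCE A (Python) =====
-- def sliding_sum(lst, n, k):
--     result = []
--     for i in range(0, len(lst)):
--         slice = lst[i:i+n]
--         if len(slice) < n:
--             slice.append(0)
--         if sum(slice) == k:
--             result.append(slice)
--     return result
-- ===== SOURCE B (Python) =====
-- def sliding_sum(lst, n, k):
--     # prefix sums: window sum in O(1), slice built only on match
--     L = len(lst)
--     prefix = [0]
--     acc = 0
--     for x in lst:
--         acc += x
--         prefix.append(acc)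
--     result = []
--     for i in range(L):
--         hi = max(i, min(i + n, L))
--         if prefix[hi] - prefix[i] == k:
--             window = lst[i:hi]
--             if hi - i < n:
--                 window.append(0)
--             result.append(window)
--     return result
-- ===== Notes on version B (the rewrite author's own statement) =====
-- stated objective: faster
-- what changed: Replaces the per-index slice+sum (each window resliced and summed from scratch) by a prefix-sum array: each window sum is one O(1) subtraction and the slice is materialised only when it matches.
-- outside the precondition, e.g. on sliding_sum([1, 2, 3], -1, 3): A returns [[1, 2]], B returns []
import Mathlib
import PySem

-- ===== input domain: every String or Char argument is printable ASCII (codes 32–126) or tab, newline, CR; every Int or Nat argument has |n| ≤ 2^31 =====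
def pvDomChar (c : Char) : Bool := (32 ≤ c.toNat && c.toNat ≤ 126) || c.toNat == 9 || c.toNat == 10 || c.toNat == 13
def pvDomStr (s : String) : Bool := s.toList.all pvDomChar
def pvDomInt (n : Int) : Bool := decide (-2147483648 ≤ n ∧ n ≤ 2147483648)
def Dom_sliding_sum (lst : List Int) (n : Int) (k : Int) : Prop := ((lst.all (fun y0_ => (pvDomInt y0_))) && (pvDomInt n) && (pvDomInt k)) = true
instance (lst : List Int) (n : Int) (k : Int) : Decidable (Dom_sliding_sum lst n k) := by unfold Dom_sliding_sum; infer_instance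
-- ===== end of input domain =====

-- B replaces the per-index slice+sum by a prefix-sum array (O(1) window sums, slice built only on match); proved equal to A for nonnegative window size n.


-- ===== PORT A =====
-- for i in range(len(lst)): slice = lst[i:i+n]; pad with one 0 if short; keep if sum == k
def sliding_sum (lst : List Int) (n : Int) (k : Int) : List (List Int) :=
  (PySem.List.pyRange 0 (lst.length : Int) 1).foldl
    (fun result i =>
      let s0 := PySem.List.slice lst (some i) (some (i + n))
      let s := if (s0.length : Int) < n then s0 ++ [0] else s0
      if s.sum = k then result ++ [s] else result)
    []

-- ===== PORT B =====
-- prefix-sum list built once; window sum is a subtraction; slice built only on a match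
def sliding_sum_alt (lst : List Int) (n : Int) (k : Int) : List (List Int) :=
  let pr := (lst.foldl (fun (q : List Int × Int) x => (q.1 ++ [q.2 + x], q.2 + x)) ([0], 0)).1
  (PySem.List.pyRange 0 (lst.length : Int) 1).foldl
    (fun result i =>
      let hi := max i (min (i + n) (lst.length : Int))
      if PySem.List.pyGetD pr hi 0 - PySem.List.pyGetD pr i 0 = k then
        let w := PySem.List.slice lst (some i) (some hi)
        result ++ [if hi - i < n then w ++ [0] else w]
      else result)
    []

-- ===== PRECONDITION & SPEC =====
-- Pre_ excludes negative n (on which A still returns): there Python's negative slice stop i+n wraps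
-- around the end of the list, an accident of slice notation outside the natural domain of a window size.
def Pre_sliding_sum (lst : List Int) (n : Int) (k : Int) : Prop := 0 ≤ n
instance (lst : List Int) (n : Int) (k : Int) : Decidable (Pre_sliding_sum lst n k) := by unfold Pre_sliding_sum; infer_instance
def pvWitness_sliding_sum : List Int × Int × Int := ([1, 2, 3], 2, 3)

def Spec_sliding_sum (lst : List Int) (n : Int) (k : Int) (out : List (List Int)) : Prop := out = sliding_sum_alt lst n k
instance (lst : List Int) (n : Int) (k : Int) (out : List (List Int)) : Decidable (Spec_sliding_sum lst n k out) := by unfold Spec_sliding_sum; infer_instance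

-- ===== CLAIM (what is proved, stated in full; the proofs are below) =====
def Claim_equal_sliding_sum : Prop := ∀ (lst : List Int) (n : Int) (k : Int), Dom_sliding_sum lst n k → Pre_sliding_sum lst n k → Spec_sliding_sum lst n k (sliding_sum lst n k)

-- ===== LEMMAS AND PROOFS =====

-- the prefix fold, fully characterised
theorem pref_fold (lst : List Int) (p : List Int) (a : Int) :
    lst.foldl (fun (q : List Int × Int) x => (q.1 ++ [q.2 + x], q.2 + x)) (p, a)
      = (p ++ (List.range lst.length).map (fun j => a + (lst.take (j + 1)).sum), a + lst.sum) := by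
  induction lst generalizing p a with
  | nil => simp
  | cons x xs ih =>
    simp only [List.foldl_cons]
    rw [ih]
    simp [List.range_succ_eq_map, List.map_map, Function.comp, add_assoc]

-- reading the prefix list at an in-range index gives the sum of a prefix of lst
theorem pref_get (lst : List Int) (j : Int) (h0 : 0 ≤ j) (h1 : j ≤ (lst.length : Int)) :
    PySem.List.pyGetD ((lst.foldl (fun (q : List Int × Int) x => (q.1 ++ [q.2 + x], q.2 + x)) ([0], 0)).1) j 0
      = (lst.take j.toNat).sum := by
  obtain ⟨t, rfl⟩ := Int.eq_ofNat_of_zero_le h0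
  have ht : t ≤ lst.length := by exact_mod_cast h1
  rw [pref_fold]
  rw [PySem.List.pyGetD_eq_getElem _ _ h0 (by simp; omega)]
  cases t with
  | zero => simp
  | succ m =>
    have hm : m < lst.length := by omega
    simp [hm]

theorem take_sub (lst : List Int) (a m : Nat) :
    ((lst.drop a).take m).sum = (lst.take (a + m)).sum - (lst.take a).sum := by
  rw [List.take_add]; simp

theorem sliding_sum_spec' (lst : List Int) (n : Int) (k : Int) (hn : 0 ≤ n) :
    sliding_sum lst n k = sliding_sum_alt lst n k := by
  unfold sliding_sum sliding_sum_alt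
  apply PySem.List.foldl_congr_mem
  intro acc i hmem
  obtain ⟨h0, h1⟩ := PySem.List.mem_pyRange_one.mp hmem
  simp only []
  have hhi : max i (min (i + n) (lst.length : Int)) = min (i + n) (lst.length : Int) := by omega
  rw [hhi]
  set hi : Int := min (i + n) (lst.length : Int) with hdef
  have hhi0 : (0:Int) ≤ hi := by omega
  have hs0 : PySem.List.slice lst (some i) (some (i + n))
      = (lst.drop i.toNat).take ((i + n).toNat - i.toNat) :=
    PySem.List.slice_toNat lst h0 (by omega)
  have hsw : PySem.List.slice lst (some i) (some hi)
      = (lst.drop i.toNat).take (hi.toNat - i.toNat) :=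
    PySem.List.slice_toNat lst h0 hhi0
  have hseq : (lst.drop i.toNat).take ((i + n).toNat - i.toNat)
      = (lst.drop i.toNat).take (hi.toNat - i.toNat) := by
    apply List.take_eq_take_iff.mpr
    simp only [List.length_drop]
    omega
  have hlen' : ((lst.drop i.toNat).take (hi.toNat - i.toNat)).length = hi.toNat - i.toNat := by
    simp only [List.length_take, List.length_drop]
    omega
  have hlen : (((lst.drop i.toNat).take (hi.toNat - i.toNat)).length : Int) = hi - i := by
    rw [hlen']; omega
  have hsum : ((lst.drop i.toNat).take (hi.toNat - i.toNat)).sum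
      = (lst.take hi.toNat).sum - (lst.take i.toNat).sum := by
    have h3 : i.toNat + (hi.toNat - i.toNat) = hi.toNat := by omega
    rw [take_sub lst i.toNat (hi.toNat - i.toNat), h3]
  rw [pref_get lst hi hhi0 (by omega), pref_get lst i h0 (by omega)]
  rw [hs0, hseq, hsw, hlen]
  have hsumpad : (if hi - i < n then (lst.drop i.toNat).take (hi.toNat - i.toNat) ++ [0]
      else (lst.drop i.toNat).take (hi.toNat - i.toNat)).sum
      = (lst.take hi.toNat).sum - (lst.take i.toNat).sum := by
    split <;> simp [List.sum_append, hsum]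
  rw [hsumpad]

-- ===== VERDICT (by name: the statement is the Claim_ definition above) =====
theorem sliding_sum_spec : Claim_equal_sliding_sum := by
  intro lst n k _ hn
  exact sliding_sum_spec' lst n k hn
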